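-- pv_equiv track=rewrite | github.com/Mazars-Tech/AD_Miner | ad_miner/sources/modules/controls/users_rdp_access.py | parseRDPData
-- ===== SOURCE A (Python) =====
-- def parseRDPData(list_of_dict):
--     final_dict = {}
--     for dict in list_of_dict:
--         if dict["user"] in final_dict.keys():
--             final_dict[dict["user"]] += [dict["computer"]]
--         else:
--             final_dict[dict["user"]] = [dict["computer"]]
--     return final_dict
-- ===== SOURCE B (Python) =====
-- def parseRDPData(list_of_dict):
--     users = []
--     for d in list_of_dict:
--         if d["user"] not in users:
--             users.append(d["user"])
--     return {u: [d["computer"] for d in list_of_dict if d["user"] == u]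
--             for u in users}
-- ===== Notes on version B (the rewrite author's own statement) =====
-- stated objective: alternative
-- what changed: A builds the dict incrementally (membership test, append-or-create per entry); B first collects the distinct users in order of first occurrence, then builds the result in one dict comprehension that filters the computers of each user.
import Mathlib
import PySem

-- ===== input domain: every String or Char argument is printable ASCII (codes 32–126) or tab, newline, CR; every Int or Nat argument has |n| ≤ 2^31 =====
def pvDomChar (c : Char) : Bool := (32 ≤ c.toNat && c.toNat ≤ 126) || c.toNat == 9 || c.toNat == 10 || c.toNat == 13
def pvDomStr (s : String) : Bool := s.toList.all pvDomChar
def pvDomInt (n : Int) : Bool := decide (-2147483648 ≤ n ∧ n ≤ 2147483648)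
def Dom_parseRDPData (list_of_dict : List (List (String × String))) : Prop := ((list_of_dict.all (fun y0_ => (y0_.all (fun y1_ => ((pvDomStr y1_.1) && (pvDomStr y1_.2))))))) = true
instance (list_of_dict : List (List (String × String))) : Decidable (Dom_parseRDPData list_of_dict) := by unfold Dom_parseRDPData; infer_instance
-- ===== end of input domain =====

-- B replaces A's incremental dict building by a two-pass decomposition (distinct users, then one
-- filter per user); same return value, no speed claim.

-- ===== PORT A =====
-- A: one pass, membership test in the dict, append to or create the entry.
def parseRDPData (list_of_dict : List (List (String × String))) : List (String × List String) :=
  (list_of_dict.foldl (fun fd d =>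
      let u := (PySem.Dict.mk d).getD "user" ""
      if fd.contains u then
        fd.insert u (fd.getD u [] ++ [(PySem.Dict.mk d).getD "computer" ""])
      else
        fd.insert u [(PySem.Dict.mk d).getD "computer" ""])
    PySem.Dict.empty).items

-- ===== PORT B =====
-- B: collect distinct users in first-occurrence order, then one comprehension per user.
def parseRDPData_alt (list_of_dict : List (List (String × String))) : List (String × List String) :=
  let users := list_of_dict.foldl (fun us d =>
      if us.contains ((PySem.Dict.mk d).getD "user" "") then us
      else us ++ [(PySem.Dict.mk d).getD "user" ""]) []
  users.map (fun u =>
    (u, (list_of_dict.filter (fun d => (PySem.Dict.mk d).getD "user" "" == u)).map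
          (fun d => (PySem.Dict.mk d).getD "computer" "")))

-- ===== PRECONDITION & SPEC =====
-- Pre_ excludes exactly the inputs where d["user"] or d["computer"] raises KeyError in A.
def Pre_parseRDPData (list_of_dict : List (List (String × String))) : Prop :=
  ∀ d ∈ list_of_dict, (PySem.Dict.mk d).contains "user" = true ∧ (PySem.Dict.mk d).contains "computer" = true
instance (list_of_dict : List (List (String × String))) : Decidable (Pre_parseRDPData list_of_dict) := by unfold Pre_parseRDPData; infer_instance
def pvWitness_parseRDPData : (List (List (String × String))) :=
  [[("user", "alice"), ("computer", "pc1")], [("user", "bob"), ("computer", "pc2")], [("user", "alice"), ("computer", "pc3")]]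
def Spec_parseRDPData (list_of_dict : List (List (String × String))) (out : List (String × List String)) : Prop := out = parseRDPData_alt list_of_dict
instance (list_of_dict : List (List (String × String))) (out : List (String × List String)) : Decidable (Spec_parseRDPData list_of_dict out) := by unfold Spec_parseRDPData; infer_instance

-- ===== CLAIM (what is proved, stated in full; the proofs are below) =====
def Claim_equal_parseRDPData : Prop := ∀ (list_of_dict : List (List (String × String))), Dom_parseRDPData list_of_dict → Pre_parseRDPData list_of_dict → Spec_parseRDPData list_of_dict (parseRDPData list_of_dict)

-- ===== LEMMAS AND PROOFS =====

def pvUserOf (d : List (String × String)) : String := (PySem.Dict.mk d).getD "user" ""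
def pvCompOf (d : List (String × String)) : String := (PySem.Dict.mk d).getD "computer" ""

-- A's loop body is exactly a `modify` with default [].
theorem pvStepA_eq (fd : PySem.Dict String (List String)) (d : List (String × String)) :
    (let u := (PySem.Dict.mk d).getD "user" ""
     if fd.contains u then
       fd.insert u (fd.getD u [] ++ [(PySem.Dict.mk d).getD "computer" ""])
     else
       fd.insert u [(PySem.Dict.mk d).getD "computer" ""]) =
    fd.modify (pvUserOf d) [] (· ++ [pvCompOf d]) := by
  simp only [pvUserOf, pvCompOf, PySem.Dict.modify]
  split_ifs with h
  · rfl
  · simp only [Bool.not_eq_true] at h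
    rw [PySem.Dict.getD_of_not_contains _ _ h]
    rfl

def pvFoldA (l : List (List (String × String))) : PySem.Dict String (List String) :=
  l.foldl (fun fd d => fd.modify (pvUserOf d) [] (· ++ [pvCompOf d])) PySem.Dict.empty

theorem pvParseA_eq_foldA (l : List (List (String × String))) :
    parseRDPData l = (pvFoldA l).items := by
  unfold parseRDPData pvFoldA
  congr 1
  apply List.foldl_ext
  intro fd d _
  exact pvStepA_eq fd d

theorem pvFoldA_getD (l : List (List (String × String))) (k : String) :
    (pvFoldA l).getD k [] = (l.filter (fun d => pvUserOf d == k)).map pvCompOf := by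
  unfold pvFoldA
  have hmap : l.foldl (fun fd d => fd.modify (pvUserOf d) [] (· ++ [pvCompOf d])) PySem.Dict.empty
      = (l.map (fun d => (pvUserOf d, pvCompOf d))).foldl
          (fun fd p => fd.modify p.1 [] (· ++ [p.2])) PySem.Dict.empty := by
    simp [List.foldl_map]
  rw [hmap, PySem.Dict.getD_foldl_modify_append]
  simp [List.filter_map, Function.comp_def]

theorem pvFoldA_keys (l : List (List (String × String))) :
    (pvFoldA l).keys = PySem.Set.ofList (l.map pvUserOf) := by
  unfold pvFoldA
  rw [PySem.Dict.keys_foldl_modify_key]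
  simp [PySem.Set.update_nil_left]

theorem pvFoldA_nodup (l : List (List (String × String))) : (pvFoldA l).keys.Nodup := by
  unfold pvFoldA
  exact PySem.Dict.nodup_keys_foldl_modify_key _ _ _ _ _ (by simp)

theorem pvUsersB_eq (l : List (List (String × String))) :
    l.foldl (fun us d =>
      if us.contains ((PySem.Dict.mk d).getD "user" "") then us
      else us ++ [(PySem.Dict.mk d).getD "user" ""]) [] = PySem.Set.ofList (l.map pvUserOf) := by
  rw [show PySem.Set.ofList (l.map pvUserOf) = PySem.Set.update [] (l.map pvUserOf) from
        (PySem.Set.update_nil_left _).symm,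
      PySem.Set.update_map_eq_foldl_add]
  apply List.foldl_ext
  intro us d _
  simp [PySem.Set.add, pvUserOf]

-- ===== VERDICT (by name: the statement is the Claim_ definition above) =====
theorem parseRDPData_spec : Claim_equal_parseRDPData := by
  intro l _ _
  unfold Spec_parseRDPData parseRDPData_alt
  rw [pvParseA_eq_foldA, pvUsersB_eq,
      PySem.Dict.items_eq_map_keys (pvFoldA l) (pvFoldA_nodup l) [], pvFoldA_keys]
  apply List.map_congr_left
  intro u _
  rw [pvFoldA_getD]
  simp [pvUserOf, pvCompOf]
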